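-- pv_equiv track=rewrite | github.com/gjgonzalez28/project_nautilus | tools/inspect_session.py | get_latest_trace_id
-- ===== SOURCE A (Python) =====
-- def get_latest_trace_id(logs):
--     """Get the most recent trace ID."""
--     if not logs:
--         return None
--
--     trace_ids = {}
--     for log in logs:
--         trace_id = log.get("trace_id")
--         if trace_id:
--             if trace_id not in trace_ids:
--                 trace_ids[trace_id] = log.get("timestamp")
--
--     if not trace_ids:
--         return None
--
--     return max(trace_ids.items(), key=lambda x: x[1])[0]
-- ===== SOURCE B (Python) =====
-- def get_latest_trace_id(logs):
--     """Get the most recent trace ID."""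
--     if not logs:
--         return None
--     seen = set()
--     best_id = None
--     best_ts = None
--     for log in logs:
--         trace_id = log.get("trace_id")
--         if trace_id and trace_id not in seen:
--             seen.add(trace_id)
--             ts = log.get("timestamp")
--             if best_id is None or ts > best_ts:
--                 best_id = trace_id
--                 best_ts = ts
--     return best_id
-- ===== Notes on version B (the rewrite author's own statement) =====
-- stated objective: alternative
-- what changed: B replaces A's two-phase build-a-dict-of-first-seen-timestamps-then-max(items) with one fused pass that keeps a seen set and a running best_id/best_ts (strict > so the first-seen id wins ties), never materialising the dict.
import Mathlib
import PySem

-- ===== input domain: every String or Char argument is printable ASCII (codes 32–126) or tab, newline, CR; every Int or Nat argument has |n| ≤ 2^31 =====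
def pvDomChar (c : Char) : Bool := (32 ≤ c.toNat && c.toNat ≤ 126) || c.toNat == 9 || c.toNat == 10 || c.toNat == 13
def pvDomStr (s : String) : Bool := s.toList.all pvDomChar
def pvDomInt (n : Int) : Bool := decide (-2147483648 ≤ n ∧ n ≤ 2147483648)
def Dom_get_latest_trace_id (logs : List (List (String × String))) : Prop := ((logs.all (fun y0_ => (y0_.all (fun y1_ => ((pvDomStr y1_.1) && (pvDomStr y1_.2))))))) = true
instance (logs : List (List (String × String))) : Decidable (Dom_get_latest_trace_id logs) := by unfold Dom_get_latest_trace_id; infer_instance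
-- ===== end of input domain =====

-- B replaces A's build-a-dict-then-max two-phase computation by one fused pass keeping a
-- running best (alternative decomposition; same asymptotic cost, no intermediate dict).

-- ===== PORT A =====
-- Python's `x > y` on Optional[str]: defined where both are strings; on None Python raises
-- TypeError — those inputs are excluded by Pre_ below, so the `false` result is never reached there.
def pyGtOptStr : Option String → Option String → Bool
  | some a, some b => decide (b < a)
  | _, _ => false

-- loop body of A's dict-building `for log in logs`
def aFold (d : PySem.Dict String (Option String)) (log : List (String × String)) :
    PySem.Dict String (Option String) :=
  match PySem.Dict.get? (PySem.Dict.mk log) "trace_id" with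
  | some t =>
      if t ≠ "" then
        (if PySem.Dict.contains d t then d
         else PySem.Dict.insert d t (PySem.Dict.get? (PySem.Dict.mk log) "timestamp"))
      else d
  | none => d

-- step of `max(trace_ids.items(), key=lambda x: x[1])`: keep the first maximum (strict >)
def mStep (best item : String × Option String) : String × Option String :=
  if pyGtOptStr item.2 best.2 then item else best

def get_latest_trace_id (logs : List (List (String × String))) : Option String :=
  if logs = [] then none
  else
    let d := logs.foldl aFold (PySem.Dict.empty : PySem.Dict String (Option String))
    match PySem.Dict.items d with
    | [] => none
    | x :: xs => some ((xs.foldl mStep x).1)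

-- ===== PORT B =====
-- loop body of B's single pass: state = (seen, best_id, best_ts)
def bFold (st : PySem.Set String × Option String × Option String)
    (log : List (String × String)) :
    PySem.Set String × Option String × Option String :=
  match PySem.Dict.get? (PySem.Dict.mk log) "trace_id" with
  | some t =>
      if t ≠ "" ∧ ¬ (PySem.Set.contains st.1 t = true) then
        let ts := PySem.Dict.get? (PySem.Dict.mk log) "timestamp"
        if st.2.1.isNone || pyGtOptStr ts st.2.2 then (PySem.Set.add st.1 t, some t, ts)
        else (PySem.Set.add st.1 t, st.2.1, st.2.2)
      else st
  | none => st

def get_latest_trace_id_alt (logs : List (List (String × String))) : Option String :=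
  if logs = [] then none
  else (logs.foldl bFold ((PySem.Set.empty : PySem.Set String), none, none)).2.1

-- ===== PRECONDITION & SPEC =====
-- truthy log.get("trace_id") (None and "" are falsy)
def pvTruthyTid (log : List (String × String)) : Option String :=
  match PySem.Dict.get? (PySem.Dict.mk log) "trace_id" with
  | some t => if t = "" then none else some t
  | none => none

-- Pre_ excludes exactly the inputs on which Python A raises TypeError: two or more distinct
-- truthy trace_ids while some first-seen log among them lacks a "timestamp" key, so that
-- max's key comparison meets None.
def Pre_get_latest_trace_id (logs : List (List (String × String))) : Prop :=
  (PySem.Set.ofList (logs.filterMap pvTruthyTid)).length ≤ 1 ∨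
  ∀ i < logs.length, (pvTruthyTid (logs.getD i [])).isSome →
    (∃ j < i, pvTruthyTid (logs.getD j []) = pvTruthyTid (logs.getD i [])) ∨
    (PySem.Dict.get? (PySem.Dict.mk (logs.getD i [])) "timestamp").isSome

instance (logs : List (List (String × String))) : Decidable (Pre_get_latest_trace_id logs) := by
  unfold Pre_get_latest_trace_id; infer_instance

def pvWitness_get_latest_trace_id : (List (List (String × String))) :=
  [[("trace_id", "a"), ("timestamp", "1")], [("trace_id", "b"), ("timestamp", "2")]]

def Spec_get_latest_trace_id (logs : List (List (String × String))) (out : Option String) : Prop := out = get_latest_trace_id_alt logs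
instance (logs : List (List (String × String))) (out : Option String) : Decidable (Spec_get_latest_trace_id logs out) := by unfold Spec_get_latest_trace_id; infer_instance

-- ===== CLAIM (what is proved, stated in full; the proofs are below) =====
def Claim_equal_get_latest_trace_id : Prop := ∀ (logs : List (List (String × String))), Dom_get_latest_trace_id logs → Pre_get_latest_trace_id logs → Spec_get_latest_trace_id logs (get_latest_trace_id logs)

-- ===== LEMMAS AND PROOFS =====

-- the value B's state abstracts from A's dict: best = first maximum of d.items (or nothing)
def bestOf (items : List (String × Option String)) : Option String × Option String :=
  match items with
  | [] => (none, none)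
  | x :: xs => ((some (xs.foldl mStep x).1), (xs.foldl mStep x).2)

theorem loop_eq (logs : List (List (String × String)))
    (d : PySem.Dict String (Option String)) (seen : PySem.Set String) (bid bts : Option String)
    (hseen : seen = PySem.Dict.keys d)
    (hbest : (bid, bts) = bestOf (PySem.Dict.items d)) :
    (match PySem.Dict.items (logs.foldl aFold d) with
     | [] => none
     | x :: xs => some ((xs.foldl mStep x).1))
    = (logs.foldl bFold (seen, bid, bts)).2.1 := by
  induction logs generalizing d seen bid bts with
  | nil =>
      simp only [List.foldl_nil]
      cases h : PySem.Dict.items d with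
      | nil => rw [h] at hbest; simp [bestOf] at hbest; simp [hbest.1]
      | cons x xs => rw [h] at hbest; simp [bestOf] at hbest; simp [hbest.1]
  | cons log rest ih =>
      simp only [List.foldl_cons]
      cases hgt : PySem.Dict.get? (PySem.Dict.mk log) "trace_id" with
      | none =>
          rw [show aFold d log = d by simp [aFold, hgt],
              show bFold (seen, bid, bts) log = (seen, bid, bts) by simp [bFold, hgt]]
          exact ih d seen bid bts hseen hbest
      | some t =>
          by_cases ht : t = ""
          · rw [show aFold d log = d by simp [aFold, hgt, ht],
                show bFold (seen, bid, bts) log = (seen, bid, bts) by simp [bFold, hgt, ht]]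
            exact ih d seen bid bts hseen hbest
          · by_cases hc : PySem.Dict.contains d t = true
            · have hmem : t ∈ seen := by
                rw [hseen]; exact (PySem.Dict.contains_iff_mem_keys d t).mp hc
              rw [show aFold d log = d by simp [aFold, hgt, ht, hc],
                  show bFold (seen, bid, bts) log = (seen, bid, bts) by
                    simp [bFold, hgt, ht, hmem]]
              exact ih d seen bid bts hseen hbest
            · -- fresh trace id: A appends to the dict, B updates seen and the running best
              have hc' : PySem.Dict.contains d t = false := by
                simpa using hc
              have hmem : t ∉ seen := by
                rw [hseen]
                intro hm
                exact hc ((PySem.Dict.contains_iff_mem_keys d t).mpr hm)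
              have hA : aFold d log
                  = PySem.Dict.insert d t (PySem.Dict.get? (PySem.Dict.mk log) "timestamp") := by
                simp [aFold, hgt, ht, hc']
              have hkeys : PySem.Dict.keys
                    (PySem.Dict.insert d t (PySem.Dict.get? (PySem.Dict.mk log) "timestamp"))
                  = PySem.Dict.keys d ++ [t] :=
                PySem.Dict.keys_insert_of_not_contains d _ hc'
              have hitems : PySem.Dict.items
                    (PySem.Dict.insert d t (PySem.Dict.get? (PySem.Dict.mk log) "timestamp"))
                  = PySem.Dict.items d ++ [(t, PySem.Dict.get? (PySem.Dict.mk log) "timestamp")] :=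
                PySem.Dict.items_insert_of_not_contains d _ hc'
              have hadd : PySem.Set.add seen t = seen ++ [t] := by
                simp [PySem.Set.add, hmem]
              have hseen' : PySem.Set.add seen t
                  = PySem.Dict.keys
                      (PySem.Dict.insert d t (PySem.Dict.get? (PySem.Dict.mk log) "timestamp")) := by
                rw [hadd, hkeys, hseen]
              cases hd : PySem.Dict.items d with
              | nil =>
                  rw [hd] at hbest; simp [bestOf] at hbest
                  obtain ⟨hb1, hb2⟩ := hbest
                  have hB : bFold (seen, bid, bts) log
                      = (PySem.Set.add seen t, some t,
                         PySem.Dict.get? (PySem.Dict.mk log) "timestamp") := by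
                    simp [bFold, hgt, ht, hmem, hb1]
                  rw [hA, hB]
                  refine ih _ _ _ _ hseen' ?_
                  rw [hitems, hd]
                  simp [bestOf]
              | cons x xs =>
                  rw [hd] at hbest; simp [bestOf] at hbest
                  obtain ⟨hb1, hb2⟩ := hbest
                  have hfold : ((xs ++ [(t, PySem.Dict.get? (PySem.Dict.mk log) "timestamp")]).foldl mStep x)
                      = mStep (xs.foldl mStep x)
                          (t, PySem.Dict.get? (PySem.Dict.mk log) "timestamp") := by
                    rw [List.foldl_append]; rfl
                  rw [hA]
                  by_cases hgtb :
                      pyGtOptStr (PySem.Dict.get? (PySem.Dict.mk log) "timestamp") bts = true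
                  · have hB : bFold (seen, bid, bts) log
                        = (PySem.Set.add seen t, some t,
                           PySem.Dict.get? (PySem.Dict.mk log) "timestamp") := by
                      simp [bFold, hgt, ht, hmem, hgtb]
                    rw [hB]
                    refine ih _ _ _ _ hseen' ?_
                    rw [hitems, hd]
                    simp only [bestOf, List.cons_append, hfold]
                    rw [hb2] at hgtb
                    simp [mStep, hgtb]
                  · have hB : bFold (seen, bid, bts) log
                        = (PySem.Set.add seen t, bid, bts) := by
                      simp [bFold, hgt, ht, hmem, hgtb, hb1]
                    rw [hB]
                    refine ih _ _ _ _ hseen' ?_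
                    rw [hitems, hd]
                    simp only [bestOf, List.cons_append, hfold]
                    rw [hb2] at hgtb
                    simp [mStep, hgtb, hb1, hb2]

theorem ports_eq (logs : List (List (String × String))) :
    get_latest_trace_id logs = get_latest_trace_id_alt logs := by
  unfold get_latest_trace_id get_latest_trace_id_alt
  by_cases h : logs = []
  · simp [h]
  · simp only [h, if_false]
    exact loop_eq logs PySem.Dict.empty PySem.Set.empty none none (by rfl) (by rfl)

-- ===== VERDICT (by name: the statement is the Claim_ definition above) =====
theorem get_latest_trace_id_spec : Claim_equal_get_latest_trace_id := by
  intro logs _ _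
  unfold Spec_get_latest_trace_id
  exact ports_eq logs
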